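-- pv_equiv track=rewrite | github.com/greenkey/adventofcode | 2016/06/correct_signal.py | get_message_from_stream
-- ===== SOURCE A (Python) =====
-- def get_message_from_stream(f):
-- 	counter_template = [0 for i in range(ord('a'),ord('z')+1)]
-- 	counter = list()
-- 	for l in f:
-- 		for c in range(len(l.strip())):
-- 			try:
-- 				counter[c][ord(l[c])-ord('a')] += 1
-- 			except IndexError:
-- 				counter.append(counter_template[:])
-- 				counter[c][ord(l[c])-ord('a')] += 1
-- 	s1 = ''
-- 	s2 = ''
-- 	for c in range(len(counter)):
-- 		s1 += chr(counter[c].index(max(counter[c]))+ord('a'))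
-- 		s2 += chr(counter[c].index(min(counter[c]))+ord('a'))
-- 	return (s1,s2)
-- ===== SOURCE B (Python) =====
-- def get_message_from_stream(f):
--     # Column-major: gather one 26-slot tally per column, then pick most/least common.
--     lines = list(f)
--     widths = [len(l.strip()) for l in lines]
--     maxw = max(widths, default=0)
--     s1 = []
--     s2 = []
--     for c in range(maxw):
--         tally = [0] * 26
--         for l, w in zip(lines, widths):
--             if c < w:
--                 tally[ord(l[c]) - ord('a')] += 1
--         s1.append(chr(tally.index(max(tally)) + ord('a')))
--         s2.append(chr(tally.index(min(tally)) + ord('a')))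
--     return (''.join(s1), ''.join(s2))
-- ===== Notes on version B (the rewrite author's own statement) =====
-- stated objective: alternative
-- what changed: Replaces A's row-major streaming with try/except-driven list growth by a column-major pass: compute max stripped width once, then build a fresh 26-slot tally per column and pick most/least common from it; same tie-breaking and zero-count handling.
import Mathlib
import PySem

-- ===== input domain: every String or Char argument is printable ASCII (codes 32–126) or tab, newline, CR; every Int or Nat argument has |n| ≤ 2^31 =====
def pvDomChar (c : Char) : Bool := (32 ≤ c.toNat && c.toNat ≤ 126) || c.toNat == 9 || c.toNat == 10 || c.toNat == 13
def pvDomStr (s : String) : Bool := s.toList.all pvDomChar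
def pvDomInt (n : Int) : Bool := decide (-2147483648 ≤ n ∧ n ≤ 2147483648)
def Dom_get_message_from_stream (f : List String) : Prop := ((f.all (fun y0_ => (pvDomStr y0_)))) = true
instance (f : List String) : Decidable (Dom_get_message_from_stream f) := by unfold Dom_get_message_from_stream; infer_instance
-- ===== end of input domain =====

-- B replaces A's row-major streaming (try/except-grown list of per-column counters) by a
-- column-major pass: one fresh 26-slot tally per column of the max stripped width. Alternative
-- decomposition, same results; both Pythons raise on the same inputs (excluded by Pre_).

-- ===== shared Python-primitive helpers (identical snippets in both Pythons) =====
-- len(l.strip())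
def pvW (l : String) : Nat := (PySem.Chars.strip l.toList).length
-- ord(l[c]) - ord('a')  (used only under c < len(l.strip()) ≤ len(l), where the getD default is unreachable)
def pvCidx (l : String) (c : Nat) : Int := ((l.toList.getD c 'a').toNat : Int) - 97
-- row[idx] += 1 : Python list item assignment, negative index wraps once; exact for -len ≤ idx < len
-- (outside that range Python raises IndexError — such inputs are excluded by Pre_)
def pvIncr (row : List Int) (idx : Int) : List Int :=
  let j := if idx < 0 then idx + (row.length : Int) else idx
  row.set j.toNat (row.getD j.toNat 0 + 1)
-- row.index(max(row)) and row.index(min(row)) (row is always the nonempty 26-slot tally)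
def pvMaxIdx (row : List Int) : Nat :=
  (PySem.List.index? row ((PySem.List.max? row (fun x => x)).getD 0)).getD 0
def pvMinIdx (row : List Int) : Nat :=
  (PySem.List.index? row ((PySem.List.min? row (fun x => x)).getD 0)).getD 0

-- ===== PORT A =====
def get_message_from_stream (f : List String) : String × String :=
  let counter := f.foldl (fun cnt l =>
    (List.range (pvW l)).foldl (fun cnt c =>
      -- try: counter[c][...] += 1  /  except IndexError: counter.append(template[:]); retry
      let cnt2 := if c < cnt.length then cnt else cnt ++ [List.replicate 26 0]
      cnt2.set c (pvIncr (cnt2.getD c []) (pvCidx l c))) cnt) []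
  let p := (List.range counter.length).foldl (fun (p : List Char × List Char) c =>
      (p.1 ++ [Char.ofNat (pvMaxIdx (counter.getD c []) + 97)],
       p.2 ++ [Char.ofNat (pvMinIdx (counter.getD c []) + 97)])) ([], [])
  (String.ofList p.1, String.ofList p.2)

-- ===== PORT B =====
def get_message_from_stream_alt (f : List String) : String × String :=
  let lines := f
  let widths := lines.map (fun l => pvW l)
  let maxw := PySem.List.maxD widths (fun x => x) 0
  let p := (List.range maxw).foldl (fun (p : List Char × List Char) c =>
      let tally := (lines.zip widths).foldl
        (fun t lw => if c < lw.2 then pvIncr t (pvCidx lw.1 c) else t) (List.replicate 26 0)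
      (p.1 ++ [Char.ofNat (pvMaxIdx tally + 97)],
       p.2 ++ [Char.ofNat (pvMinIdx tally + 97)])) ([], [])
  (String.ofList p.1, String.ofList p.2)

-- ===== PRECONDITION & SPEC =====
-- Pre_ excludes exactly the inputs where Python A raises IndexError: a counted column holding a
-- character with code outside [71,122] (then ord(ch)-97 is outside [-26,25] and the 26-slot list
-- item assignment fails).  B raises there too.
def Pre_get_message_from_stream (f : List String) : Prop :=
  ∀ l ∈ f, ∀ c < pvW l, 71 ≤ (l.toList.getD c 'a').toNat ∧ (l.toList.getD c 'a').toNat ≤ 122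
instance (f : List String) : Decidable (Pre_get_message_from_stream f) := by
  unfold Pre_get_message_from_stream; infer_instance
def pvWitness_get_message_from_stream : List String := ["abc", "bcd", "cda"]

def Spec_get_message_from_stream (f : List String) (out : String × String) : Prop := out = get_message_from_stream_alt f
instance (f : List String) (out : String × String) : Decidable (Spec_get_message_from_stream f out) := by unfold Spec_get_message_from_stream; infer_instance

-- ===== CLAIM (what is proved, stated in full; the proofs are below) =====
def Claim_equal_get_message_from_stream : Prop := ∀ (f : List String), Dom_get_message_from_stream f → Pre_get_message_from_stream f → Spec_get_message_from_stream f (get_message_from_stream f)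

-- ===== LEMMAS AND PROOFS =====

-- the column tally both algorithms compute for column c
def pvTal (f : List String) (c : Nat) : List Int :=
  f.foldl (fun t l => if c < pvW l then pvIncr t (pvCidx l c) else t) (List.replicate 26 0)
-- the max stripped width
def pvMw (f : List String) : Nat := f.foldl (fun m l => max m (pvW l)) 0

theorem pvTal_append (f : List String) (l : String) (c : Nat) :
    pvTal (f ++ [l]) c = if c < pvW l then pvIncr (pvTal f c) (pvCidx l c) else pvTal f c := by
  simp [pvTal, List.foldl_append]

theorem pvMw_append (f : List String) (l : String) : pvMw (f ++ [l]) = max (pvMw f) (pvW l) := by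
  simp [pvMw, List.foldl_append]

theorem pvMw_eq (f : List String) : pvMw f = (f.map (fun l => pvW l)).foldl max 0 := by
  simp [pvMw, List.foldl_map]

theorem pvW_le_mw (f : List String) (l : String) (h : l ∈ f) : pvW l ≤ pvMw f := by
  rw [pvMw_eq]
  exact (PySem.List.le_foldl_max _ 0).2 (pvW l) (List.mem_map_of_mem h)

theorem pvFold_id (f : List String) (c : Nat) (t0 : List Int)
    (h : ∀ l ∈ f, ¬ c < pvW l) :
    f.foldl (fun t l => if c < pvW l then pvIncr t (pvCidx l c) else t) t0 = t0 := by
  induction f generalizing t0 with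
  | nil => rfl
  | cons x xs ih =>
    simp only [List.foldl_cons, if_neg (h x (by simp))]
    exact ih t0 (fun l hl => h l (by simp [hl]))

theorem pvTal_of_ge (f : List String) (c : Nat) (h : pvMw f ≤ c) :
    pvTal f c = List.replicate 26 0 := by
  exact pvFold_id f c _ (fun l hl => by have := pvW_le_mw f l hl; omega)

-- one line of A's counting loop, starting from a counter in invariant shape
theorem pvLineStep (l : String) (f : List String) (k : Nat) (hk : k ≤ pvW l) :
    (List.range k).foldl (fun cnt c =>
        let cnt2 := if c < cnt.length then cnt else cnt ++ [List.replicate 26 0]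
        cnt2.set c (pvIncr (cnt2.getD c []) (pvCidx l c)))
      ((List.range (pvMw f)).map (pvTal f))
    = (List.range (max (pvMw f) k)).map
        (fun c => if c < k then pvIncr (pvTal f c) (pvCidx l c) else pvTal f c) := by
  induction k with
  | zero => simp
  | succ k ih =>
    rw [List.range_succ, List.foldl_append, ih (by omega)]
    simp only [List.foldl_cons, List.foldl_nil, List.length_map, List.length_range]
    by_cases hkm : k < pvMw f
    · have h1 : max (pvMw f) k = pvMw f := by omega
      have h2 : max (pvMw f) (k + 1) = pvMw f := by omega
      rw [h1, h2, if_pos (by omega)]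
      have hget : ((List.range (pvMw f)).map
          (fun c => if c < k then pvIncr (pvTal f c) (pvCidx l c) else pvTal f c)).getD k []
          = pvTal f k := by
        rw [PySem.List.getD_map_range _ _ _ _ hkm]; simp
      rw [hget]
      apply List.ext_getElem (by simp)
      intro i hi _
      simp only [List.getElem_set, List.getElem_map, List.getElem_range] at *
      by_cases hik : k = i
      · subst hik; simp
      · simp only [if_neg hik]
        have : (i < k) = (i < k + 1) := by
          by_cases h : i < k
          · simp [h]; omega
          · simp [h]; omega
        by_cases h : i < k
        · simp [h, Nat.lt_succ_of_lt h]
        · have : ¬ i < k + 1 := by omega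
          simp [h, this]
    · have hm : pvMw f ≤ k := by omega
      have h1 : max (pvMw f) k = k := by omega
      have h2 : max (pvMw f) (k + 1) = k + 1 := by omega
      rw [h1, h2, if_neg (by omega)]
      have hlen : ((List.range k).map
          (fun c => if c < k then pvIncr (pvTal f c) (pvCidx l c) else pvTal f c)).length = k := by
        simp
      rw [List.getD_eq_getElem?_getD]
      rw [List.getElem?_append_right (by omega)]
      simp only [hlen, Nat.sub_self, List.getElem?_cons_zero, Option.getD_some]
      have hset : (((List.range k).map
            (fun c => if c < k then pvIncr (pvTal f c) (pvCidx l c) else pvTal f c)) ++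
            [List.replicate (26:Nat) (0:Int)]).set k (pvIncr (List.replicate 26 0) (pvCidx l k))
          = ((List.range k).map
            (fun c => if c < k then pvIncr (pvTal f c) (pvCidx l c) else pvTal f c)) ++
            [pvIncr (List.replicate 26 0) (pvCidx l k)] := by
        rw [show k = (((List.range k).map
            (fun c => if c < k then pvIncr (pvTal f c) (pvCidx l c) else pvTal f c))).length
          from hlen.symm]
        simp [List.set_append_right]
      rw [hset, List.range_succ, List.map_append]
      congr 1
      · apply List.map_congr_left
        intro c hc
        have hck : c < k := List.mem_range.mp hc
        simp [hck, Nat.lt_succ_of_lt hck]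
      · simp [pvTal_of_ge f k hm]

-- A's whole counting phase equals the column-wise description
theorem pvCounter_eq (f : List String) :
    f.foldl (fun cnt l =>
      (List.range (pvW l)).foldl (fun cnt c =>
        let cnt2 := if c < cnt.length then cnt else cnt ++ [List.replicate 26 0]
        cnt2.set c (pvIncr (cnt2.getD c []) (pvCidx l c))) cnt) []
    = (List.range (pvMw f)).map (pvTal f) := by
  induction f using List.reverseRecOn with
  | nil => simp [pvMw]
  | append_singleton f l ih =>
    rw [List.foldl_append, List.foldl_cons, List.foldl_nil, ih,
      pvLineStep l f (pvW l) le_rfl, pvMw_append]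
    apply List.map_congr_left
    intro c _
    rw [pvTal_append]

-- B's zip fold is the plain fold over the lines
theorem pvZip_fold (lines : List String) (c : Nat) (t0 : List Int) :
    ((lines.zip (lines.map (fun l => pvW l))).foldl
        (fun t lw => if c < lw.2 then pvIncr t (pvCidx lw.1 c) else t) t0)
    = lines.foldl (fun t l => if c < pvW l then pvIncr t (pvCidx l c) else t) t0 := by
  induction lines generalizing t0 with
  | nil => rfl
  | cons x xs ih => simp [List.zip_cons_cons, List.foldl_cons, ih]

-- B's max(widths, default=0) is the running max A's counter length reaches
theorem pvMaxD_eq (f : List String) :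
    PySem.List.maxD (f.map (fun l => pvW l)) (fun x => x) 0 = pvMw f := by
  cases f with
  | nil => rfl
  | cons x xs =>
    rw [pvMw_eq]
    simp only [List.map_cons, PySem.List.maxD, PySem.List.max?_id_cons, Option.getD_some,
      List.foldl_cons, Nat.zero_max]

-- ===== VERDICT (by name: the statement is the Claim_ definition above) =====
theorem get_message_from_stream_spec : Claim_equal_get_message_from_stream := by
  intro f _ _
  show get_message_from_stream f = get_message_from_stream_alt f
  simp only [get_message_from_stream, get_message_from_stream_alt]
  rw [pvCounter_eq, pvMaxD_eq]
  simp only [List.length_map, List.length_range]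
  refine congrArg (fun p : List Char × List Char => (String.ofList p.1, String.ofList p.2)) ?_
  apply PySem.List.foldl_congr_mem
  intro acc c hc
  rw [pvZip_fold]
  have hc' : c < pvMw f := List.mem_range.mp hc
  rw [PySem.List.getD_map_range _ _ _ _ hc']
  rfl
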